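-- pv_equiv track=rewrite | github.com/lifuyue/calculator | glycoenum/formula.py | format_hill
-- ===== SOURCE A (Python) =====
-- from typing import Mapping
--
-- def format_hill(counts: Mapping[str, int]) -> str:
--     """Format element counts according to Hill notation."""
--     normalized = {
--         _canonical_symbol(elem): int(amount)
--         for elem, amount in counts.items()
--         if int(amount) != 0
--     }
--     if not normalized:
--         return "0"
--
--     def sort_key(element: str) -> tuple[int, str]:
--         if element == "C":
--             return (0, element)
--         if element == "H":
--             return (1, element)
--         return (2, element)
--
--     parts: list[str] = []
--     for element in sorted(normalized, key=sort_key):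
--         value = normalized[element]
--         parts.append(element if value == 1 else f"{element}{value}")
--     return "".join(parts)
--
-- def _canonical_symbol(symbol: str) -> str:
--     if not symbol:
--         raise ValueError("Element symbol cannot be empty")
--     return symbol[0].upper() + symbol[1:].lower()
-- ===== SOURCE B (Python) =====
-- def format_hill(counts):
--     """Format element counts in Hill notation: one pass of binary-search ordered insertion."""
--     def canon(s):
--         if not s:
--             raise ValueError("Element symbol cannot be empty")
--         return s[0].upper() + s[1:].lower()
--
--     def rank(e):
--         return 0 if e == "C" else 1 if e == "H" else 2
--
--     acc = []  # (element, value) pairs kept sorted by Hill order (rank, element)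
--     for elem, amount in counts.items():
--         v = int(amount)
--         if v == 0:
--             continue
--         e = canon(elem)
--         ke = (rank(e), e)
--         lo, hi = 0, len(acc)
--         while lo < hi:  # binary search for the insertion point (lower bound)
--             mid = (lo + hi) // 2
--             q = acc[mid][0]
--             if (rank(q), q) < ke:
--                 lo = mid + 1
--             else:
--                 hi = mid
--         if lo < len(acc) and acc[lo][0] == e:
--             acc[lo] = (e, v)
--         else:
--             acc.insert(lo, (e, v))
--     if not acc:
--         return "0"
--     return "".join(e if v == 1 else f"{e}{v}" for e, v in acc)
-- ===== Notes on version B (the rewrite author's own statement) =====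
-- stated objective: alternative
-- what changed: B drops A's normalized dict and custom-keyed sort entirely: a single pass over the items keeps the output association list in Hill order by binary-search ordered insertion (replace on canonical-symbol collision), then formats it directly.
import Mathlib
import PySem

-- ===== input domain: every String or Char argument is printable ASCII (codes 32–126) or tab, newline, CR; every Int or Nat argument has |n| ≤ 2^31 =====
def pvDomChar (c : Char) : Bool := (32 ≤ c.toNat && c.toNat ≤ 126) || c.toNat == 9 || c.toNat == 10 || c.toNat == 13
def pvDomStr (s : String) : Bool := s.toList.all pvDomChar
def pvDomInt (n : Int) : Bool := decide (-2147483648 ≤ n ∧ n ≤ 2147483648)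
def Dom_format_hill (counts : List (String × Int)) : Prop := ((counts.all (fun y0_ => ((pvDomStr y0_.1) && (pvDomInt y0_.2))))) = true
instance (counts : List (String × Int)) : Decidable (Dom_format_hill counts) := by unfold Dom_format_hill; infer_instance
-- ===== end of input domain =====

-- B replaces A's normalized dict + custom-keyed sort by a single pass that keeps the output
-- association list in Hill order via binary-search ordered insertion (objective: alternative algorithm).


-- ===== PORT A =====
-- _canonical_symbol: symbol[0].upper() + symbol[1:].lower(); on "" Python raises ValueError
-- (excluded by Pre_format_hill), the port returns "" there.
def canonicalSymbolA (s : String) : String :=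
  match s.toList with
  | [] => ""
  | c :: rest => String.ofList (PySem.Chars.upperChar c :: PySem.Chars.lower rest)

-- first component of sort_key (the second component is the element itself)
def sortKeyA (e : String) : Int := if e = "C" then 0 else if e = "H" then 1 else 2

def format_hill (counts : List (String × Int)) : String :=
  let d := PySem.Dict.ofList counts
  let normalized := d.items.foldl
    (fun nd p => if p.2 ≠ 0 then nd.insert (canonicalSymbolA p.1) p.2 else nd)
    PySem.Dict.empty
  if normalized.items = [] then "0"
  else
    let parts := (PySem.List.sorted2 normalized.keys sortKeyA (fun e => e)).foldl
      (fun ps e =>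
        let v := normalized.getD e 0
        ps ++ [if v = 1 then e else String.ofList (e.toList ++ PySem.Int.toChars v)]) []
    PySem.Str.join "" parts

-- ===== PORT B =====
-- canon(s): s[0].upper() + s[1:].lower(); raises on "" like A (excluded by Pre_), port returns "".
def canonB (s : String) : String :=
  match s.toList with
  | [] => ""
  | c :: rest => String.ofList (PySem.Chars.upperChar c :: PySem.Chars.lower rest)

-- rank(e): 0 if e == "C" else 1 if e == "H" else 2
def rankB (e : String) : Int := if e = "C" then 0 else if e = "H" then 1 else 2

-- the Hill comparison key (rank(e), e) used by B; Python tuple < = lexicographic = Prod.Lex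
def hillKey (e : String) : Int ×ₗ String := toLex (rankB e, e)

-- B's binary-search loop (lower bound): while lo < hi: mid=(lo+hi)//2; …
-- In the Python loop mid < hi ≤ len(acc) always holds, so acc[mid] never fails;
-- the none case below is unreachable there (the port returns lo on it).
def bsearchB (acc : List (String × Int)) (ke : Int ×ₗ String) (lo hi : Nat) : Nat :=
  if _h : lo < hi then
    match acc[(lo + hi) / 2]? with
    | some q =>
      if hillKey q.1 < ke then bsearchB acc ke ((lo + hi) / 2 + 1) hi
      else bsearchB acc ke lo ((lo + hi) / 2)
    | none => lo
  else lo
termination_by hi - lo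
decreasing_by all_goals omega

-- the body of B's for-loop: skip zeros, binary-search the slot, replace or insert.
-- acc[lo] = (e, v) with 0 ≤ lo < len(acc) is List.set (exact there);
-- acc.insert(lo, (e, v)) is PySem.List.insert (exact Python list.insert).
def stepB (acc : List (String × Int)) (p : String × Int) : List (String × Int) :=
  if p.2 = 0 then acc
  else
    let e := canonB p.1
    let lo := bsearchB acc (hillKey e) 0 acc.length
    if acc[lo]?.any (fun q => q.1 == e) then acc.set lo (e, p.2)
    else PySem.List.insert acc (lo : Int) (e, p.2)

def format_hill_alt (counts : List (String × Int)) : String :=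
  let acc := (PySem.Dict.ofList counts).items.foldl stepB []
  if acc = [] then "0"
  else PySem.Str.join ""
    (acc.map (fun q => if q.2 = 1 then q.1 else String.ofList (q.1.toList ++ PySem.Int.toChars q.2)))

-- ===== PRECONDITION & SPEC =====
-- Pre_ excludes exactly the inputs where both Pythons raise ValueError: a dict that maps the
-- empty symbol "" to a nonzero count (dict lookup = last pair with that key).
def Pre_format_hill (counts : List (String × Int)) : Prop :=
  ((counts.reverse.find? (fun p => p.1 == "")).all (fun p => p.2 == 0)) = true
instance (counts : List (String × Int)) : Decidable (Pre_format_hill counts) := by unfold Pre_format_hill; infer_instance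

def pvWitness_format_hill : (List (String × Int)) := [("c", 6), ("h", 12), ("O", 6), ("", 0)]

def Spec_format_hill (counts : List (String × Int)) (out : String) : Prop := out = format_hill_alt counts
instance (counts : List (String × Int)) (out : String) : Decidable (Spec_format_hill counts out) := by unfold Spec_format_hill; infer_instance

-- ===== CLAIM (what is proved, stated in full; the proofs are below) =====
def Claim_equal_format_hill : Prop := ∀ (counts : List (String × Int)), Dom_format_hill counts → Pre_format_hill counts → Spec_format_hill counts (format_hill counts)

-- ===== LEMMAS AND PROOFS =====

theorem canon_eq : canonicalSymbolA = canonB := rfl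

theorem hillKey_inj {a b : String} (h : hillKey a = hillKey b) : a = b := by
  have := congrArg (fun p : Int ×ₗ String => (ofLex p).2) h
  simpa [hillKey] using this

-- A's step function rewritten into the shape shared with B's dict-free reasoning
theorem stepA_eq :
    (fun (nd : PySem.Dict String Int) (p : String × Int) =>
      if p.2 ≠ 0 then nd.insert (canonicalSymbolA p.1) p.2 else nd) =
    (fun (nd : PySem.Dict String Int) (p : String × Int) =>
      if p.2 = 0 then nd else nd.insert (canonB p.1) p.2) := by
  funext nd p
  by_cases h : p.2 = 0 <;> simp [h, canon_eq]

def HillSorted (l : List (String × Int)) : Prop :=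
  l.Pairwise (fun a b => hillKey a.1 < hillKey b.1)

-- proof-side characterization of one ordered insertion (what stepB does on a sorted list):
-- walk past entries whose key is smaller, then replace (same element) or insert before
def insStep (e : String) (v : Int) : List (String × Int) → List (String × Int)
  | [] => [(e, v)]
  | q :: t =>
    if hillKey q.1 < hillKey e then q :: insStep e v t
    else if q.1 = e then (e, v) :: t
    else (e, v) :: q :: t

-- membership through one ordered insertion
theorem mem_insStep {e : String} {v : Int} {l : List (String × Int)} (hs : HillSorted l)
    {q : String × Int} :
    q ∈ insStep e v l ↔ q = (e, v) ∨ (q ∈ l ∧ q.1 ≠ e) := by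
  induction l with
  | nil => simp [insStep]
  | cons p t ih =>
    have hs' : HillSorted t := (List.pairwise_cons.mp hs).2
    have hhead := (List.pairwise_cons.mp hs).1
    by_cases hlt : hillKey p.1 < hillKey e
    · have hpe : p.1 ≠ e := fun h => by simp [h] at hlt
      simp only [insStep, if_pos hlt, List.mem_cons, ih hs']
      constructor
      · rintro (h | h | ⟨h1, h2⟩)
        · subst h; exact Or.inr ⟨Or.inl rfl, hpe⟩
        · exact Or.inl h
        · exact Or.inr ⟨Or.inr h1, h2⟩
      · rintro (h | ⟨h1 | h1, h2⟩)
        · exact Or.inr (Or.inl h)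
        · exact Or.inl h1
        · exact Or.inr (Or.inr ⟨h1, h2⟩)
    · by_cases hq : p.1 = e
      · -- replace branch: tail keys are all > hillKey p.1 = hillKey e, hence ≠ e
        have ht : ∀ r ∈ t, r.1 ≠ e := by
          intro r hr h
          exact absurd (hq ▸ h ▸ hhead r hr) (lt_irrefl _)
        rw [show insStep e v (p :: t) = (e, v) :: t from by simp [insStep, hq]]
        rw [List.mem_cons]
        constructor
        · rintro (h | h)
          · exact Or.inl h
          · exact Or.inr ⟨List.mem_cons.mpr (Or.inr h), ht q h⟩
        · rintro (h | ⟨h1, h2⟩)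
          · exact Or.inl h
          · rcases List.mem_cons.mp h1 with h3 | h3
            · exact absurd (by rw [h3]; exact hq) h2
            · exact Or.inr h3
      · have ht : ∀ r ∈ p :: t, r.1 ≠ e := by
          intro r hr h
          rcases List.mem_cons.mp hr with h1 | h1
          · exact hq (h1 ▸ h)
          · have h2 := hhead r h1
            have : hillKey e ≤ hillKey p.1 := le_of_not_gt hlt
            exact absurd (lt_of_le_of_lt this (h ▸ h2)) (lt_irrefl _)
        rw [show insStep e v (p :: t) = (e, v) :: p :: t from by simp [insStep, hlt, hq]]
        rw [List.mem_cons]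
        constructor
        · rintro (h | h)
          · exact Or.inl h
          · exact Or.inr ⟨h, ht q h⟩
        · rintro (h | ⟨h1, _⟩)
          · exact Or.inl h
          · exact Or.inr h1

-- ordered insertion preserves strict Hill sortedness
theorem insStep_sorted {e : String} {v : Int} {l : List (String × Int)} (hs : HillSorted l) :
    HillSorted (insStep e v l) := by
  induction l with
  | nil => simp [insStep, HillSorted]
  | cons p t ih =>
    have hs' : HillSorted t := (List.pairwise_cons.mp hs).2
    have hhead := (List.pairwise_cons.mp hs).1
    by_cases hlt : hillKey p.1 < hillKey e
    · show HillSorted (insStep e v (p :: t))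
      rw [show insStep e v (p :: t) = p :: insStep e v t from by simp [insStep, hlt]]
      refine List.pairwise_cons.mpr ⟨?_, ih hs'⟩
      intro r hr
      rcases (mem_insStep hs').mp hr with h | ⟨h, _⟩
      · rw [h]; exact hlt
      · exact hhead r h
    · by_cases hq : p.1 = e
      · show HillSorted (insStep e v (p :: t))
        rw [show insStep e v (p :: t) = (e, v) :: t from by simp [insStep, hq]]
        refine List.pairwise_cons.mpr ⟨?_, hs'⟩
        intro r hr
        rw [show hillKey (e, v).1 = hillKey p.1 from by rw [hq]]
        exact hhead r hr
      · have hle : hillKey e ≤ hillKey p.1 := le_of_not_gt hlt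
        have hlt2 : hillKey e < hillKey p.1 :=
          lt_of_le_of_ne hle (fun h => hq (hillKey_inj h).symm)
        show HillSorted (insStep e v (p :: t))
        rw [show insStep e v (p :: t) = (e, v) :: p :: t from by simp [insStep, hlt, hq]]
        refine List.pairwise_cons.mpr ⟨?_, hs⟩
        intro r hr
        rcases List.mem_cons.mp hr with h | h
        · rw [h]; exact hlt2
        · exact lt_trans hlt2 (hhead r h)

-- the keys after an insertion that replaces: unchanged
theorem map_fst_insStep_mem {e : String} {v : Int} {l : List (String × Int)}
    (hs : HillSorted l) (he : e ∈ l.map Prod.fst) :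
    (insStep e v l).map Prod.fst = l.map Prod.fst := by
  induction l with
  | nil => simp at he
  | cons p t ih =>
    have hs' : HillSorted t := (List.pairwise_cons.mp hs).2
    have hhead := (List.pairwise_cons.mp hs).1
    by_cases hlt : hillKey p.1 < hillKey e
    · have hpe : p.1 ≠ e := fun h => by simp [h] at hlt
      have het : e ∈ t.map Prod.fst := by
        rcases List.mem_map.mp he with ⟨r, hr, hre⟩
        rcases List.mem_cons.mp hr with h | h
        · exact absurd (h ▸ hre) hpe
        · exact List.mem_map.mpr ⟨r, h, hre⟩
      simp [insStep, hlt, ih hs' het]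
    · by_cases hq : p.1 = e
      · simp [insStep, hlt, hq]
      · exfalso
        rcases List.mem_map.mp he with ⟨r, hr, hre⟩
        rcases List.mem_cons.mp hr with h | h
        · exact hq (h ▸ hre)
        · have := hhead r h
          have hle : hillKey e ≤ hillKey p.1 := le_of_not_gt hlt
          exact absurd (lt_of_le_of_lt hle (hre ▸ this)) (lt_irrefl _)

-- the keys after an insertion of a new element: a permutation of e :: keys
theorem map_fst_insStep_not_mem {e : String} {v : Int} {l : List (String × Int)}
    (he : e ∉ l.map Prod.fst) :
    ((insStep e v l).map Prod.fst).Perm (e :: l.map Prod.fst) := by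
  induction l with
  | nil => simp [insStep]
  | cons p t ih =>
    have hpe : p.1 ≠ e := fun h => he (by simp [h])
    have het : e ∉ t.map Prod.fst := fun h => he (by simp [h])
    by_cases hlt : hillKey p.1 < hillKey e
    · rw [show insStep e v (p :: t) = p :: insStep e v t from by simp [insStep, hlt]]
      simpa using ((ih het).cons p.1).trans (List.Perm.swap e p.1 (t.map Prod.fst))
    · rw [show insStep e v (p :: t) = (e, v) :: p :: t from by simp [insStep, hlt, hpe]]
      simp

-- Python list.insert at an in-range nonnegative index
theorem pyinsert_eq (xs : List (String × Int)) (lo : Nat) (h : lo ≤ xs.length)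
    (x : String × Int) :
    PySem.List.insert xs (lo : Int) x = xs.take lo ++ x :: xs.drop lo := by
  simp only [PySem.List.insert, PySem.List.sliceIndices]
  norm_num
  rw [show min (lo : Int) (xs.length : Int) = (lo : Int) from by omega]
  rw [if_neg (by omega : ¬((lo : Int) < 0))]
  simp

-- B's binary search finds the lower bound: everything before it is < ke, nothing from it on is
theorem bsearch_spec (acc : List (String × Int)) (ke : Int ×ₗ String) (hs : HillSorted acc) :
    ∀ (n lo hi : Nat), hi - lo ≤ n → lo ≤ hi → hi ≤ acc.length →
    (∀ j, j < lo → ∀ hj : j < acc.length, hillKey acc[j].1 < ke) →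
    (∀ j, hi ≤ j → ∀ hj : j < acc.length, ¬ hillKey acc[j].1 < ke) →
    bsearchB acc ke lo hi ≤ acc.length ∧
    (∀ j, j < bsearchB acc ke lo hi → ∀ hj : j < acc.length, hillKey acc[j].1 < ke) ∧
    (∀ j, bsearchB acc ke lo hi ≤ j → ∀ hj : j < acc.length, ¬ hillKey acc[j].1 < ke) := by
  have hpair := List.pairwise_iff_getElem.mp hs
  intro n
  induction n with
  | zero =>
    intro lo hi hn hle hlen h4 h5
    rw [bsearchB, dif_neg (by omega : ¬ lo < hi)]
    exact ⟨by omega, h4, fun j hj => h5 j (by omega)⟩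
  | succ n ih =>
    intro lo hi hn hle hlen h4 h5
    by_cases hlh : lo < hi
    · have hmid : (lo + hi) / 2 < acc.length := by omega
      rw [bsearchB, dif_pos hlh, List.getElem?_eq_getElem hmid]
      dsimp only
      by_cases hk : hillKey (acc[(lo + hi) / 2].1) < ke
      · rw [if_pos hk]
        refine ih ((lo + hi) / 2 + 1) hi (by omega) (by omega) hlen ?_ h5
        intro j hj hjl
        rcases Nat.lt_or_ge j ((lo + hi) / 2) with h | h
        · exact lt_trans (hpair j _ hjl hmid h) hk
        · have : j = (lo + hi) / 2 := by omega
          subst this; exact hk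
      · rw [if_neg hk]
        refine ih lo ((lo + hi) / 2) (by omega) (by omega) (by omega) h4 ?_
        intro j hj hjl hlt
        rcases Nat.lt_or_ge ((lo + hi) / 2) j with h | h
        · exact hk (lt_trans (hpair _ j hmid hjl h) hlt)
        · have : j = (lo + hi) / 2 := by omega
          subst this; exact hk hlt
    · rw [bsearchB, dif_neg hlh]
      exact ⟨by omega, h4, fun j hj => h5 j (by omega)⟩

-- replace-or-splice at the lower bound is exactly the linear ordered insertion
theorem setins_eq_insStep (e : String) (v : Int) :
    ∀ (acc : List (String × Int)) (i : Nat),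
    (∀ j, j < i → ∀ hj : j < acc.length, hillKey acc[j].1 < hillKey e) →
    i ≤ acc.length →
    (∀ j, i ≤ j → ∀ hj : j < acc.length, ¬ hillKey acc[j].1 < hillKey e) →
    (if acc[i]?.any (fun q => q.1 == e) then acc.set i (e, v)
     else acc.take i ++ (e, v) :: acc.drop i) = insStep e v acc := by
  intro acc
  induction acc with
  | nil =>
    intro i _ hle _
    have : i = 0 := by simpa using hle
    subst this
    simp [insStep]
  | cons p t ih =>
    intro i h1 hle h3
    cases i with
    | zero =>
      have hnlt : ¬ hillKey p.1 < hillKey e := by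
        have := h3 0 (by omega) (by simp)
        simpa using this
      by_cases hq : p.1 = e
      · simp [insStep, hnlt, hq]
      · simp [insStep, hnlt, hq]
    | succ i =>
      have hplt : hillKey p.1 < hillKey e := by
        have := h1 0 (by omega) (by simp)
        simpa using this
      have step : insStep e v (p :: t) = p :: insStep e v t := by
        simp [insStep, hplt]
      rw [step]
      have hrec := ih i
        (fun j hj hjl => by
          have := h1 (j + 1) (by omega) (by simpa using Nat.succ_lt_succ hjl)
          simpa using this)
        (by simpa using Nat.le_of_succ_le_succ (by simpa using hle))
        (fun j hj hjl => by
          have := h3 (j + 1) (by omega) (by simpa using Nat.succ_lt_succ hjl)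
          simpa using this)
      rw [← hrec]
      by_cases hc : (t[i]?.any (fun q => q.1 == e)) = true
      · simp [hc]
      · simp [hc]

-- on a sorted accumulator B's loop body is the ordered insertion (zeros skipped)
theorem stepB_eq {acc : List (String × Int)} (p : String × Int) (hs : HillSorted acc) :
    stepB acc p = if p.2 = 0 then acc else insStep (canonB p.1) p.2 acc := by
  by_cases h0 : p.2 = 0
  · simp [stepB, h0]
  · simp only [stepB, if_neg h0]
    obtain ⟨hle, hlt, hge⟩ := bsearch_spec acc (hillKey (canonB p.1)) hs acc.length 0
      acc.length (by omega) (by omega) (le_refl _)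
      (fun j hj hjl => absurd hj (by omega))
      (fun j hj hjl => absurd hjl (by omega))
    rw [pyinsert_eq acc _ hle]
    exact setins_eq_insStep (canonB p.1) p.2 acc _ hlt hle hge

-- B's accumulator tracks A's normalized dict through the shared fold
theorem fold_inv (l : List (String × Int)) (nd : PySem.Dict String Int)
    (acc : List (String × Int)) (hnd : nd.keys.Nodup) (hs : HillSorted acc)
    (hp : (acc.map Prod.fst).Perm nd.keys)
    (hv : ∀ q ∈ acc, nd.getD q.1 0 = q.2) :
    let nd' := l.foldl (fun nd p => if p.2 = 0 then nd else nd.insert (canonB p.1) p.2) nd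
    let acc' := l.foldl stepB acc
    nd'.keys.Nodup ∧ HillSorted acc' ∧ (acc'.map Prod.fst).Perm nd'.keys ∧
      ∀ q ∈ acc', nd'.getD q.1 0 = q.2 := by
  induction l generalizing nd acc with
  | nil => exact ⟨hnd, hs, hp, hv⟩
  | cons p t ih =>
    simp only [List.foldl_cons, stepB_eq p hs]
    by_cases h0 : p.2 = 0
    · simpa [h0] using ih nd acc hnd hs hp hv
    · simp only [if_neg h0]
      set e := canonB p.1 with he
      refine ih _ _ (PySem.Dict.nodup_keys_insert nd _ _ hnd) (insStep_sorted hs) ?_ ?_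
      · by_cases hmem : e ∈ acc.map Prod.fst
        · have hcont : nd.contains e = true := by
            rw [PySem.Dict.contains_eq_decide_mem_keys]
            exact decide_eq_true (hp.mem_iff.mp hmem)
          rw [map_fst_insStep_mem hs hmem, PySem.Dict.keys_insert_of_contains _ _ hcont]
          exact hp
        · have hcont : nd.contains e = false := by
            rw [PySem.Dict.contains_eq_decide_mem_keys]
            exact decide_eq_false (fun h => hmem (hp.mem_iff.mpr h))
          rw [PySem.Dict.keys_insert_of_not_contains _ _ hcont]
          refine ((map_fst_insStep_not_mem hmem).trans (hp.cons e)).trans ?_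
          simpa using (List.perm_append_comm (l₁ := [e]) (l₂ := nd.keys))
      · intro q hq
        rcases (mem_insStep hs).mp hq with h | ⟨h1, h2⟩
        · subst h; simp
        · rw [PySem.Dict.getD_insert, if_neg h2]
          exact hv q h1

-- A's keyed sort over exactly the keys of B's accumulator returns those keys in B's order
theorem sorted2_eq_sorted_lex {α : Type} (xs : List α) (k1 : α → Int) (k2 : α → String) :
    PySem.List.sorted2 xs k1 k2 =
    PySem.List.sorted xs (fun x => toLex (k1 x, k2 x)) := by
  unfold PySem.List.sorted2 PySem.List.sorted
  simp only [Bool.false_eq_true, if_false]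
  congr 1
  funext acc a
  congr 1
  funext x y
  rcases lt_trichotomy (k1 x) (k1 y) with h | h | h
  · simp [Prod.Lex.toLex_lt_toLex, h, lt_asymm h]
  · simp [Prod.Lex.toLex_lt_toLex, h]
  · simp [Prod.Lex.toLex_lt_toLex, h, lt_asymm h, h.ne']

-- ===== VERDICT =====
theorem format_hill_spec : Claim_equal_format_hill := by
  intro counts _ _
  unfold Spec_format_hill format_hill format_hill_alt
  dsimp only
  rw [stepA_eq]
  have hinv := fold_inv (PySem.Dict.ofList counts).items PySem.Dict.empty []
    PySem.Dict.nodup_keys_empty (by simp [HillSorted]) (by simp [PySem.Dict.keys_empty])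
    (by simp)
  obtain ⟨hnd, hs, hp, hv⟩ := hinv
  set nd := (PySem.Dict.ofList counts).items.foldl
    (fun nd p => if p.2 = 0 then nd else nd.insert (canonB p.1) p.2) PySem.Dict.empty with hnddef
  set acc := (PySem.Dict.ofList counts).items.foldl stepB [] with haccdef
  have hempty : nd.items = [] ↔ acc = [] := by
    constructor
    · intro h
      have hk : nd.keys = [] := by simp [PySem.Dict.keys, h]
      have : acc.map Prod.fst = [] := (hk ▸ hp).eq_nil
      exact List.map_eq_nil_iff.mp this
    · intro h
      have : nd.keys = [] := by
        rw [h] at hp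
        exact hp.symm.eq_nil
      simpa [PySem.Dict.keys, List.map_eq_nil_iff] using this
  by_cases h : nd.items = []
  · rw [if_pos h, if_pos (hempty.mp h)]
  · rw [if_neg h, if_neg (fun hc => h (hempty.mpr hc))]
    rw [PySem.List.foldl_append_singleton_eq_map]
    have hkeys : PySem.List.sorted2 nd.keys sortKeyA (fun e => e) = acc.map Prod.fst := by
      rw [sorted2_eq_sorted_lex]
      exact PySem.List.sorted_eq_of_perm_of_pairwise_lt _ _ _ hp (List.pairwise_map.mpr hs)
    rw [hkeys, List.map_map]
    congr 1
    apply List.map_congr_left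
    intro q hq
    simp [Function.comp, hv q hq]
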